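-- pv_equiv track=rewrite | github.com/miliar/Code_Jam_Webscraper | solutions_python/Problem_155/2632.py | calculate_friends_needed
-- ===== SOURCE A (Python) =====
-- def calculate_friends_needed(max_shyness, shyness_levels):
--     friends_needed = 0
--     audience_members_clapping = 0
--     for i in range(len(shyness_levels)):
--         if audience_members_clapping <= i:
--             difference = i - audience_members_clapping
--             friends_needed += difference
--             audience_members_clapping += difference
--         audience_members_clapping += int(shyness_levels[i])
--         if audience_members_clapping >= int(max_shyness):
--             return friends_needed
--     return friends_needed
-- ===== SOURCE B (Python) =====
-- def _prefix_sums(levels):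
--     sums = [0]
--     total = 0
--     for s in levels:
--         total += int(s)
--         sums.append(total)
--     return sums
--
--
-- def _running_max_deficits(prefix_sums):
--     maxima = []
--     cur = 0
--     for i in range(len(prefix_sums) - 1):
--         cur = max(cur, i - prefix_sums[i])
--         maxima.append(cur)
--     return maxima
--
--
-- def calculate_friends_needed(max_shyness, shyness_levels):
--     prefix = _prefix_sums(shyness_levels)
--     maxima = _running_max_deficits(prefix)
--     threshold = int(max_shyness)
--     for m, p in zip(maxima, prefix[1:]):
--         if m + p >= threshold:
--             return m
--     return maxima[-1] if maxima else 0
-- ===== Notes on version B (the rewrite author's own statement) =====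
-- stated objective: alternative
-- what changed: B replaces A's single online simulation with a patched augmented clap counter by three staged passes: it first materialises the list of prefix sums, then the list of running-maximum deficits, and finally scans those precomputed lists for the first index where the threshold is met.
import Mathlib
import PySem

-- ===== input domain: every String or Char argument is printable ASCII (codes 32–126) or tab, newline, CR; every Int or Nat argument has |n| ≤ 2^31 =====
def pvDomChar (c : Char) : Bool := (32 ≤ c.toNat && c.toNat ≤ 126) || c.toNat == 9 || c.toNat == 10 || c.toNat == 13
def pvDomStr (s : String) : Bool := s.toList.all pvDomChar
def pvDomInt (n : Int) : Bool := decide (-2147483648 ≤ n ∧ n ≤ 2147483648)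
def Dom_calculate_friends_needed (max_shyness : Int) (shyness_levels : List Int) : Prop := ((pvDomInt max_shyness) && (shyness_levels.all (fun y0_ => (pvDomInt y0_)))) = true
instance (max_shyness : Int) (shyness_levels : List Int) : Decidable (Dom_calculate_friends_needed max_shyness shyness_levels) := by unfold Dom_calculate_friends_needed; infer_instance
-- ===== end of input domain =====

-- B replaces A's online patched-counter simulation by three staged passes over precomputed
-- lists (prefix sums, running-max deficits, then a scan for the first threshold index);
-- same O(n) cost, alternative structure.

-- ===== PORT A =====
def pvGoA (max_shyness : Int) : List Int → Int → Int → Int → Int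
  | [], _, friends_needed, _ => friends_needed
  | s :: rest, i, friends_needed, clapping =>
    let friends_needed' := if clapping ≤ i then friends_needed + (i - clapping) else friends_needed
    let clapping' := if clapping ≤ i then clapping + (i - clapping) else clapping
    let clapping'' := clapping' + s
    if clapping'' ≥ max_shyness then friends_needed'
    else pvGoA max_shyness rest (i + 1) friends_needed' clapping''

def calculate_friends_needed (max_shyness : Int) (shyness_levels : List Int) : Int :=
  pvGoA max_shyness shyness_levels 0 0 0

-- ===== PORT B =====
-- stage 1: _prefix_sums — 'sums = [0]; for s in levels: total += s; sums.append(total)'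
def pvGoPrefix : List Int → Int → List Int
  | [], _ => []
  | s :: rest, total => (total + s) :: pvGoPrefix rest (total + s)

def pvPrefixSums (levels : List Int) : List Int := 0 :: pvGoPrefix levels 0

-- stage 2: _running_max_deficits — iterates i over range(len(prefix)-1), i.e. over prefix.dropLast
def pvGoMax : List Int → Int → Int → List Int
  | [], _, _ => []
  | p :: rest, i, cur =>
    let cur' := max cur (i - p)
    cur' :: pvGoMax rest (i + 1) cur'

def pvMaxima (pfxs : List Int) : List Int := pvGoMax pfxs.dropLast 0 0

-- stage 3: the scan 'for m, p in zip(maxima, prefix[1:]): if m + p >= threshold: return m'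
def pvGoScan (threshold : Int) : List (Int × Int) → Option Int
  | [] => none
  | (m, p) :: rest => if m + p ≥ threshold then some m else pvGoScan threshold rest

def calculate_friends_needed_alt (max_shyness : Int) (shyness_levels : List Int) : Int :=
  let pfxs := pvPrefixSums shyness_levels
  let maxima := pvMaxima pfxs
  (pvGoScan max_shyness (maxima.zip pfxs.tail)).getD (maxima.getLast?.getD 0)

-- ===== PRECONDITION & SPEC =====
def Spec_calculate_friends_needed (max_shyness : Int) (shyness_levels : List Int) (out : Int) : Prop := out = calculate_friends_needed_alt max_shyness shyness_levels
instance (max_shyness : Int) (shyness_levels : List Int) (out : Int) : Decidable (Spec_calculate_friends_needed max_shyness shyness_levels out) := by unfold Spec_calculate_friends_needed; infer_instance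

-- ===== CLAIM (what is proved, stated in full; the proofs are below) =====
def Claim_equal_calculate_friends_needed : Prop := ∀ (max_shyness : Int) (shyness_levels : List Int), Dom_calculate_friends_needed max_shyness shyness_levels → Spec_calculate_friends_needed max_shyness shyness_levels (calculate_friends_needed max_shyness shyness_levels)

-- ===== LEMMAS AND PROOFS =====
theorem pvGetLastD_cons (a x : Int) (l : List Int) :
    ((a :: l).getLast?).getD x = (l.getLast?).getD a := by
  cases l with
  | nil => rfl
  | cons b t =>
    obtain ⟨v, hv⟩ := Option.isSome_iff_exists.mp
      (List.getLast?_isSome.mpr (by simp : (b :: t) ≠ []))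
    rw [List.getLast?_cons_cons, hv]
    rfl

-- invariant: A's clap counter equals friends + (real prefix sum); B's staged lists,
-- generalized to an arbitrary starting index i, running max cur and prefix pfx.
theorem pvGo_eq (m : Int) (xs : List Int) :
    ∀ (i cur pfx : Int),
      pvGoA m xs i cur (cur + pfx) =
        (pvGoScan m ((pvGoMax ((pfx :: pvGoPrefix xs pfx).dropLast) i cur).zip
            (pvGoPrefix xs pfx))).getD
          (((pvGoMax ((pfx :: pvGoPrefix xs pfx).dropLast) i cur).getLast?).getD cur) := by
  induction xs with
  | nil => intro i cur pfx; rfl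
  | cons s rest ih =>
    intro i cur pfx
    have hcur : (if cur + pfx ≤ i then cur + (i - (cur + pfx)) else cur) = max cur (i - pfx) := by
      by_cases h : cur + pfx ≤ i
      · rw [if_pos h, max_eq_right (by omega : cur ≤ i - pfx)]; ring
      · rw [if_neg h, max_eq_left (by omega : i - pfx ≤ cur)]
    have hclap : (if cur + pfx ≤ i then cur + pfx + (i - (cur + pfx)) else cur + pfx) + s
        = max cur (i - pfx) + (pfx + s) := by
      by_cases h : cur + pfx ≤ i
      · rw [if_pos h, max_eq_right (by omega : cur ≤ i - pfx)]; ring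
      · rw [if_neg h, max_eq_left (by omega : i - pfx ≤ cur)]; ring
    simp only [pvGoA, pvGoPrefix, List.dropLast_cons_of_ne_nil (by simp : ((pfx + s) :: pvGoPrefix rest (pfx + s)) ≠ []), pvGoMax]
    rw [hcur, hclap]
    simp only [List.zip_cons_cons, pvGoScan]
    by_cases hc : max cur (i - pfx) + (pfx + s) ≥ m
    · rw [if_pos hc, if_pos hc]; rfl
    · rw [if_neg hc, if_neg hc]
      rw [pvGetLastD_cons]
      exact ih (i + 1) (max cur (i - pfx)) (pfx + s)

-- ===== VERDICT (by name: the statement is the Claim_ definition above) =====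
theorem calculate_friends_needed_spec : Claim_equal_calculate_friends_needed := by
  intro m xs _
  unfold Spec_calculate_friends_needed calculate_friends_needed calculate_friends_needed_alt
  unfold pvPrefixSums pvMaxima
  have := pvGo_eq m xs 0 0 0
  simpa using this
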